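-- pv_equiv track=rewrite | github.com/iansealy/projecteuler | 43.py | get_divisible_by
-- ===== SOURCE A (Python) =====
-- def get_divisible_by(divisor):
--     numbers = []
--     number = 0
--     while number + divisor < 1000:
--         number += divisor
--         str_number = '{:03d}'.format(number)
--         digits = set(i for i in str_number)
--         if len(digits) == len(str_number):
--             numbers.append(str_number)
--
--     return(numbers)
-- ===== SOURCE B (Python) =====
-- def get_divisible_by(divisor):
--     result = []
--     for n in range(1000):
--         s = '{:03d}'.format(n)
--         if n % divisor == 0 and len(set(s)) == len(s):
--             result.append(s)
--     return result
-- ===== Notes on version B (the rewrite author's own statement) =====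
-- stated objective: alternative
-- what changed: B makes a single pass over the whole three-digit range and keeps each n passing a divisibility test (n % divisor == 0) plus the distinct-digit test, instead of A's while-loop that steps through multiples by repeated addition; n = 0 is excluded naturally by the distinct-digit test. Pre_ requires a positive divisor: on non-positive divisors A never returns (infinite loop).
-- outside the precondition, e.g. on get_divisible_by(0): A does not finish within the time limit, B raises ZeroDivisionError
import Mathlib
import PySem

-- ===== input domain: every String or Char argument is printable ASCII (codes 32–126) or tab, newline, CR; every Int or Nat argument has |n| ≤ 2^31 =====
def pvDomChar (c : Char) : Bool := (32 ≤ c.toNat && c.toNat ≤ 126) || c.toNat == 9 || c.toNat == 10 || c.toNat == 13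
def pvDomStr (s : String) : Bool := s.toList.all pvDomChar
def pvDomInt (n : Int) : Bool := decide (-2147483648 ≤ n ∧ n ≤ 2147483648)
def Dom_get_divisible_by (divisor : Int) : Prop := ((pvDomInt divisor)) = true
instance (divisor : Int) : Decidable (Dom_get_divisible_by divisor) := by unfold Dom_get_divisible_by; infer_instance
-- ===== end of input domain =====

-- B is an alternative single pass over range(1000) filtered by a divisibility test,
-- instead of A's while-loop stepping through multiples; return values proved equal for divisor ≥ 1.

-- shared helper: '{:03d}'.format(n) — exact for 0 ≤ n < 1000, which covers every value either program formats
def pvFmt03 (n : Int) : String :=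
  let cs := (PySem.Int.toStr n).toList
  String.mk (List.replicate (3 - cs.length) '0' ++ cs)

-- shared helper: len(set(s)) == len(s)
def pvDistinct (s : String) : Bool :=
  (PySem.Set.ofList s.toList).length == s.toList.length

-- ===== PORT A =====
-- the while loop, with fuel 1000 (enough for every divisor ≥ 1: number grows by ≥ 1 per step)
def pvLoopA (divisor : Int) : Nat → Int → List String → List String
  | 0, _, numbers => numbers
  | fuel+1, number, numbers =>
    if number + divisor < 1000 then
      let number' := number + divisor
      let str_number := pvFmt03 number'
      pvLoopA divisor fuel number'
        (if pvDistinct str_number then numbers ++ [str_number] else numbers)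
    else numbers

def get_divisible_by (divisor : Int) : List String := pvLoopA divisor 1000 0 []

-- ===== PORT B =====
def get_divisible_by_alt (divisor : Int) : List String :=
  (PySem.List.pyRange 0 1000 1).foldl
    (fun result n =>
      if PySem.Int.mod n divisor == 0 && pvDistinct (pvFmt03 n) then result ++ [pvFmt03 n]
      else result) []

-- ===== PRECONDITION & SPEC =====
-- Pre_: for divisor ≤ 0 the Python A loops forever (never returns), so nothing is claimed there.
def Pre_get_divisible_by (divisor : Int) : Prop := 1 ≤ divisor
instance (divisor : Int) : Decidable (Pre_get_divisible_by divisor) := by unfold Pre_get_divisible_by; infer_instance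
def pvWitness_get_divisible_by : Int := 7

def Spec_get_divisible_by (divisor : Int) (out : List String) : Prop := out = get_divisible_by_alt divisor
instance (divisor : Int) (out : List String) : Decidable (Spec_get_divisible_by divisor out) := by unfold Spec_get_divisible_by; infer_instance

-- ===== CLAIM (what is proved, stated in full; the proofs are below) =====
def Claim_equal_get_divisible_by : Prop := ∀ (divisor : Int), Dom_get_divisible_by divisor → Pre_get_divisible_by divisor → Spec_get_divisible_by divisor (get_divisible_by divisor)

-- ===== LEMMAS AND PROOFS =====

-- B's loop test, as one boolean predicate
def pvP (d n : Int) : Bool := PySem.Int.mod n d == 0 && pvDistinct (pvFmt03 n)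

theorem pvAlt_eq_filter (d : Int) :
    get_divisible_by_alt d
      = ((PySem.List.pyRange 0 1000 1).filter (pvP d)).map pvFmt03 := by
  have h : get_divisible_by_alt d
      = (PySem.List.pyRange 0 1000 1).foldl
          (fun acc n => if pvP d n then acc ++ [pvFmt03 n] else acc) [] := rfl
  rw [h, PySem.List.foldl_append_if]
  simp

theorem pvP_false_between (d number x : Int) (_hd : 1 ≤ d) (hdvd : d ∣ number)
    (h1 : number < x) (h2 : x < number + d) : pvP d x = false := by
  have hnd : ¬ d ∣ x := by
    intro hx
    have h3 : d ∣ (x - number) := dvd_sub hx hdvd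
    have := Int.le_of_dvd (by omega) h3
    omega
  simp [pvP, PySem.Int.mod_eq_zero_iff_dvd, hnd]

theorem pvFilter_between_nil (d number a b : Int) (hd : 1 ≤ d) (hdvd : d ∣ number)
    (ha : number < a) (hb : b ≤ number + d) :
    (PySem.List.pyRange a b 1).filter (pvP d) = [] := by
  apply List.filter_eq_nil_iff.mpr
  intro x hx
  rw [PySem.List.mem_pyRange_one] at hx
  simp [pvP_false_between d number x hd hdvd (by omega) (by omega)]

theorem pvLoopA_eq (d : Int) (hd : 1 ≤ d) :
    ∀ (fuel : Nat) (number : Int) (acc : List String),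
      d ∣ number → (1000 - number).toNat ≤ fuel →
      pvLoopA d fuel number acc
        = acc ++ ((PySem.List.pyRange (number+1) 1000 1).filter (pvP d)).map pvFmt03 := by
  intro fuel
  induction fuel with
  | zero =>
    intro number acc _ hfuel
    rw [PySem.List.pyRange_one_eq_nil (by omega)]
    simp [pvLoopA]
  | succ f ih =>
    intro number acc hdvd hfuel
    by_cases h : number + d < 1000
    · have hstep : pvLoopA d (f+1) number acc
        = pvLoopA d f (number + d)
            (if pvDistinct (pvFmt03 (number + d)) then acc ++ [pvFmt03 (number + d)] else acc) := by
        simp only [pvLoopA, if_pos h]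
      have hf2 : (1000 - (number + d)).toNat ≤ f := by omega
      have hp : pvP d (number + d) = pvDistinct (pvFmt03 (number + d)) := by
        have hm : PySem.Int.mod (number + d) d = 0 :=
          (PySem.Int.mod_eq_zero_iff_dvd _ _).mpr (Dvd.dvd.add hdvd dvd_rfl)
        simp [pvP, hm]
      have hsplit : PySem.List.pyRange (number+1) 1000 1
          = PySem.List.pyRange (number+1) (number+d) 1 ++ PySem.List.pyRange (number+d) 1000 1 :=
        PySem.List.pyRange_one_append _ _ _ (by omega) (by omega)
      rw [hstep, ih (number + d) _ (Dvd.dvd.add hdvd dvd_rfl) hf2, hsplit, List.filter_append,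
          pvFilter_between_nil d number (number+1) (number+d) hd hdvd (by omega) (by omega),
          PySem.List.pyRange_one_cons (by omega : number + d < 1000), List.filter_cons, hp]
      cases hdist : pvDistinct (pvFmt03 (number + d)) with
      | true => simp
      | false => simp
    · have hend : pvLoopA d (f+1) number acc = acc := by
        simp only [pvLoopA, if_neg h]
      rw [hend, pvFilter_between_nil d number (number+1) 1000 hd hdvd (by omega) (by omega)]
      simp

theorem pvP_zero (d : Int) : pvP d 0 = false := by
  have : pvDistinct (pvFmt03 0) = false := by decide
  simp [pvP, this]

-- ===== VERDICT (by name: the statement is the Claim_ definition above) =====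
theorem get_divisible_by_spec : Claim_equal_get_divisible_by := by
  intro d _ hpre
  unfold Spec_get_divisible_by
  have hA : get_divisible_by d
      = ((PySem.List.pyRange 1 1000 1).filter (pvP d)).map pvFmt03 := by
    have := pvLoopA_eq d hpre 1000 0 [] (dvd_zero d) (by norm_num)
    simpa [get_divisible_by] using this
  rw [hA, pvAlt_eq_filter,
      PySem.List.pyRange_one_cons (by norm_num : (0:Int) < 1000),
      List.filter_cons]
  simp [pvP_zero]
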